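-- pv_equiv track=rewrite | github.com/Setlurs/reachy-mini-jetson-assistant | app/tools/water_data.py | _parse_rdb
-- ===== SOURCE A (Python) =====
-- from typing import Any, Dict, List, Optional, Tuple
--
-- def _parse_rdb(text: str) -> List[Dict[str, str]]:
--     rows: List[Dict[str, str]] = []
--     header: Optional[List[str]] = None
--     for line in text.splitlines():
--         if not line or line.startswith("#"):
--             continue
--         parts = line.split("\t")
--         if header is None:
--             header = parts
--             continue
--         if all(p and p[0].isdigit() for p in parts if p):
--             continue
--         rows.append(dict(zip(header, parts)))
--     return rows
-- ===== SOURCE B (Python) =====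
-- from typing import Dict, List, Optional
--
--
-- def _parse_rdb(text: str) -> List[Dict[str, str]]:
--     # Single character-level scan: lines and tab-separated fields are carved out
--     # by hand with index/accumulator loops instead of splitlines()/split().
--     rows: List[Dict[str, str]] = []
--     header: Optional[List[str]] = None
--     i, n = 0, len(text)
--     while i < n:
--         j = i
--         while j < n and text[j] != "\n" and text[j] != "\r":
--             j += 1
--         line = text[i:j]
--         if j < n and text[j] == "\r" and j + 1 < n and text[j + 1] == "\n":
--             i = j + 2
--         else:
--             i = j + 1
--         if not line or line[0] == "#":
--             continue
--         parts: List[str] = []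
--         field = ""
--         for ch in line:
--             if ch == "\t":
--                 parts.append(field)
--                 field = ""
--             else:
--                 field += ch
--         parts.append(field)
--         if header is None:
--             header = parts
--             continue
--         if all(p and p[0].isdigit() for p in parts if p):
--             continue
--         rows.append(dict(zip(header, parts)))
--     return rows
-- ===== Notes on version B (the rewrite author's own statement) =====
-- stated objective: alternative
-- what changed: Replaces A's splitlines()-then-tab-split line-list pipeline with a single hand-written character-level scanner that carves lines and tab-separated fields out of the raw text with index/accumulator loops (slower in CPython by a constant factor, since it forgoes the C-implemented string methods).
import Mathlib
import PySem

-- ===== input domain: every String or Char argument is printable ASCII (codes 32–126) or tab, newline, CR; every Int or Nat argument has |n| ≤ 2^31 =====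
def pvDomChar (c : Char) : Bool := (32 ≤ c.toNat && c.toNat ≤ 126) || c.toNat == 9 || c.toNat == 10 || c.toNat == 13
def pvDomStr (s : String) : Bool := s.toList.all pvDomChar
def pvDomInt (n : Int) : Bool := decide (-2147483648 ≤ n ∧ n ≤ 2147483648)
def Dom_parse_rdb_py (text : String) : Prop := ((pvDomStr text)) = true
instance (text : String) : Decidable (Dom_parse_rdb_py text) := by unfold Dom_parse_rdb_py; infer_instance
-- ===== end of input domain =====

-- B replaces A's splitlines()+split("\t") pipeline by one hand-written character-level
-- scanner carving lines and tab fields out of the raw text: alternative algorithm, same cost.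

-- all(p and p[0].isdigit() for p in parts if p)  (identical expression in both Pythons)
def pvNumeric (parts : List String) : Bool :=
  parts.all (fun p =>
    match p.toList with
    | [] => true
    | c :: _ => PySem.Chars.isdigit c)

-- dict(zip(header, parts)) as an items list (identical expression in both Pythons)
def pvRow (header parts : List String) : List (String × String) :=
  ((header.zip parts).foldl (fun d kv => d.insert kv.1 kv.2) PySem.Dict.empty).items

-- ===== PORT A =====
def parse_rdb_py (text : String) : List (List (String × String)) :=
  ((PySem.Str.splitlines text).foldl
    (fun (st : List (List (String × String)) × Option (List String)) line =>
      if line == "" || PySem.Str.startswith line "#" then st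
      else
        let parts := (PySem.Str.split? line "\t").getD [line]
        match st.2 with
        | none => (st.1, some parts)
        | some header =>
          if pvNumeric parts then st
          else (st.1 ++ [pvRow header parts], st.2))
    ([], none)).1

-- ===== PORT B =====
-- B's inner scan 'while j < n and text[j] not in "\n\r"': the chars of the current raw
-- line, and the rest of the text after the line terminator (\n, \r or \r\n)
def pvNextLine : List Char → List Char × List Char
  | [] => ([], [])
  | c :: cs =>
    if c = '\n' then ([], cs)
    else if c = '\r' then
      match cs with
      | '\n' :: cs' => ([], cs')
      | _ => ([], cs)
    else
      let p := pvNextLine cs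
      (c :: p.1, p.2)

theorem pvNextLine_cr (cs : List Char) (h : ∀ r', cs ≠ '\n' :: r') :
    pvNextLine ('\r' :: cs) = ([], cs) := by
  unfold pvNextLine
  rw [if_neg (by decide), if_pos rfl]
  split
  · exact absurd rfl (h _)
  · rfl

theorem pvNextLine_suffix (s : List Char) : (pvNextLine s).2.IsSuffix s := by
  induction s with
  | nil => exact List.suffix_rfl
  | cons c cs ih =>
    by_cases hn : c = '\n'
    · subst hn; simp [pvNextLine]
    · by_cases hr : c = '\r'
      · subst hr
        cases cs with
        | nil => simp [pvNextLine]
        | cons d cs' =>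
          by_cases hd : d = '\n'
          · subst hd
            have : pvNextLine ('\r' :: '\n' :: cs') = ([], cs') := rfl
            rw [this]
            exact ((List.suffix_cons '\n' cs').trans (List.suffix_cons '\r' ('\n' :: cs')))
          · rw [pvNextLine_cr _ (fun r' hh => hd ((List.cons.inj hh).1))]
            exact List.suffix_cons '\r' (d :: cs')
      · simp only [pvNextLine, if_neg hn, if_neg hr]
        exact ih.trans (List.suffix_cons c cs)

theorem pvNextLine_len_lt (c : Char) (cs : List Char) :
    (pvNextLine (c :: cs)).2.length < (c :: cs).length := by
  have h := (pvNextLine_suffix cs).length_le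
  by_cases hn : c = '\n'
  · subst hn; simp [pvNextLine]
  · by_cases hr : c = '\r'
    · subst hr
      cases cs with
      | nil => simp [pvNextLine]
      | cons d cs' =>
        by_cases hd : d = '\n'
        · subst hd
          have : pvNextLine ('\r' :: '\n' :: cs') = ([], cs') := rfl
          rw [this]; simp
        · rw [pvNextLine_cr _ (fun r' hh => hd ((List.cons.inj hh).1))]; simp
    · simp only [pvNextLine, if_neg hn, if_neg hr, List.length_cons]
      omega

-- B's per-line tab loop: 'field' accumulated in reverse, finished fields in parts
def pvSplitTabGo : List Char → List Char → List String → List String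
  | [], cur, acc => acc ++ [String.ofList cur.reverse]
  | c :: cs, cur, acc =>
    if c = '\t' then pvSplitTabGo cs [] (acc ++ [String.ofList cur.reverse])
    else pvSplitTabGo cs (c :: cur) acc

-- B's main while loop over the remaining text
def pvGoB : List Char → Option (List String) → List (List (String × String)) →
    List (List (String × String))
  | [], _, rows => rows
  | c0 :: cs, header, rows =>
    let p := pvNextLine (c0 :: cs)
    match p.1 with
    | [] => pvGoB p.2 header rows
    | c :: _ =>
      if c = '#' then pvGoB p.2 header rows
      else
        let parts := pvSplitTabGo (p.1) [] []
        match header with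
        | none => pvGoB p.2 (some parts) rows
        | some h =>
          if pvNumeric parts then pvGoB p.2 header rows
          else pvGoB p.2 header (rows ++ [pvRow h parts])
termination_by s => s.length
decreasing_by all_goals exact pvNextLine_len_lt _ _

def parse_rdb_py_alt (text : String) : List (List (String × String)) :=
  pvGoB text.toList none []

-- ===== PRECONDITION & SPEC =====
def Spec_parse_rdb_py (text : String) (out : List (List (String × String))) : Prop := out = parse_rdb_py_alt text
instance (text : String) (out : List (List (String × String))) : Decidable (Spec_parse_rdb_py text out) := by unfold Spec_parse_rdb_py; infer_instance

-- ===== CLAIM (what is proved, stated in full; the proofs are below) =====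
def Claim_equal_parse_rdb_py : Prop := ∀ (text : String), Dom_parse_rdb_py text → Spec_parse_rdb_py text (parse_rdb_py text)

-- ===== LEMMAS AND PROOFS =====

theorem pvCharOfToNat (c d : Char) (h : c.toNat = d.toNat) : c = d := by
  apply Char.ext
  apply UInt32.toNat_inj.mp
  exact h

-- A's loop body, named for the proofs
def pvStepA (st : List (List (String × String)) × Option (List String)) (line : String) :
    List (List (String × String)) × Option (List String) :=
  if line == "" || PySem.Str.startswith line "#" then st
  else
    let parts := (PySem.Str.split? line "\t").getD [line]
    match st.2 with
    | none => (st.1, some parts)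
    | some header =>
      if pvNumeric parts then st
      else (st.1 ++ [pvRow header parts], st.2)

-- the list of lines as B's scanner produces them
def pvLines : List Char → List (List Char)
  | [] => []
  | c0 :: cs => (pvNextLine (c0 :: cs)).1 :: pvLines (pvNextLine (c0 :: cs)).2
termination_by s => s.length
decreasing_by exact pvNextLine_len_lt _ _

-- pvLines with the (reversed) partial current line splitlines.go carries
def pvWithCur (cur s : List Char) : List (List Char) :=
  match s with
  | [] => if cur.isEmpty then [] else [cur.reverse]
  | _ :: _ => (cur.reverse ++ (pvNextLine s).1) :: pvLines (pvNextLine s).2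

theorem pvLines_eq_withCur (s : List Char) : pvLines s = pvWithCur [] s := by
  cases s with
  | nil => rw [pvLines]; rfl
  | cons c cs => rw [pvLines]; rfl

theorem pvGo_generic (isB : Char → Bool) (c : Char) (rest cur : List Char)
    (acc : List (List Char)) (h : ¬ (c = '\r' ∧ ∃ r', rest = '\n' :: r')) :
    PySem.Chars.splitlines.go isB (c :: rest) cur acc
      = if isB c then PySem.Chars.splitlines.go isB rest [] (cur.reverse :: acc)
        else PySem.Chars.splitlines.go isB rest (c :: cur) acc := by
  rw [PySem.Chars.splitlines.go.eq_def]
  split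
  · simp_all
  · rename_i heq; exfalso; apply h; cases heq; exact ⟨rfl, _, rfl⟩
  · rename_i heq; cases heq; rfl

theorem pvGoOn_generic (c : Char) (rest cur : List Char) (acc : List (List Char)) (fuel : Nat) :
    PySem.Chars.splitOn.go ['\t'] (fuel+1) (c :: rest) cur acc
      = if c = '\t' then PySem.Chars.splitOn.go ['\t'] fuel rest [] (cur.reverse :: acc)
        else PySem.Chars.splitOn.go ['\t'] fuel rest (c :: cur) acc := by
  rw [PySem.Chars.splitOn.go.eq_def]
  by_cases hc : c = '\t'
  · simp [List.isPrefixOf, hc]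
  · simp only [List.isPrefixOf, Bool.and_eq_true, beq_iff_eq, if_neg hc]
    rw [if_neg (by exact fun h => hc h.1.symm)]

-- direct (accumulator-free) form of Chars.splitOn on the single-char separator '\t'
def pvG : List Char → List Char → List (List Char)
  | cur, [] => [cur.reverse]
  | cur, c :: rest =>
    if c = '\t' then cur.reverse :: pvG [] rest else pvG (c :: cur) rest

theorem pvSplitOn_go_eq (fuel : Nat) (l : List Char) (hf : l.length < fuel)
    (cur : List Char) (acc : List (List Char)) :
    PySem.Chars.splitOn.go ['\t'] fuel l cur acc = acc.reverse ++ pvG cur l := by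
  induction fuel generalizing l cur acc with
  | zero => omega
  | succ fuel ih =>
    cases l with
    | nil => rw [PySem.Chars.splitOn.go.eq_def]; simp [pvG]
    | cons c rest =>
      rw [pvGoOn_generic]
      by_cases hc : c = '\t'
      · rw [if_pos hc, ih rest (by simp at hf ⊢; omega) [] (cur.reverse :: acc)]
        simp [pvG, hc]
      · rw [if_neg hc, ih rest (by simp at hf ⊢; omega) (c :: cur) acc]
        simp [pvG, hc]

theorem pvSplitTabGo_eq_pvG (cs cur : List Char) (acc : List String) :
    pvSplitTabGo cs cur acc = acc ++ (pvG cur cs).map String.ofList := by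
  induction cs generalizing cur acc with
  | nil => simp [pvSplitTabGo, pvG]
  | cons c rest ih =>
    by_cases hc : c = '\t'
    · subst hc; simp [pvSplitTabGo, pvG, ih]
    · simp [pvSplitTabGo, pvG, hc, ih]

-- A's parts for a line equal B's hand-rolled tab split
theorem pvParts_eq (l : List Char) :
    ((PySem.Str.split? (String.ofList l) "\t").getD [String.ofList l])
      = pvSplitTabGo l [] [] := by
  have h1 : PySem.Str.split? (String.ofList l) "\t"
      = some ((PySem.Chars.splitOn l ['\t']).map String.ofList) := by
    unfold PySem.Str.split? PySem.Chars.split?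
    simp
  rw [h1]
  unfold PySem.Chars.splitOn
  rw [pvSplitOn_go_eq (l.length + 1) l (by omega) [] []]
  rw [pvSplitTabGo_eq_pvG]
  simp

-- under Dom, splitlines' break predicate is just 'c is \n or \r'
theorem pvIsB_eq (c : Char) (h : pvDomChar c = true) :
    (decide (c.toNat = 10) || decide (c.toNat = 13) || decide (c.toNat = 11) ||
      decide (c.toNat = 12) || decide (c.toNat = 28) || decide (c.toNat = 29) ||
      decide (c.toNat = 30) || decide (c.toNat = 133) || decide (c.toNat = 8232) ||
      decide (c.toNat = 8233)) = (decide (c = '\n') || decide (c = '\r')) := by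
  have hd : ((32 ≤ c.toNat ∧ c.toNat ≤ 126) ∨ c.toNat = 9 ∨ c.toNat = 10 ∨ c.toNat = 13) := by
    simpa [pvDomChar, Bool.or_eq_true, Bool.and_eq_true, or_assoc] using h
  by_cases h10 : c.toNat = 10
  · have hc : c = '\n' := pvCharOfToNat c '\n' (by rw [h10]; rfl)
    subst hc; simp
  · by_cases h13 : c.toNat = 13
    · have hc : c = '\r' := pvCharOfToNat c '\r' (by rw [h13]; rfl)
      subst hc; simp
    · have hn : ¬ (c = '\n') := fun he => h10 (by rw [he]; rfl)
      have hr : ¬ (c = '\r') := fun he => h13 (by rw [he]; rfl)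
      have hrest : c.toNat ≠ 11 ∧ c.toNat ≠ 12 ∧ c.toNat ≠ 28 ∧ c.toNat ≠ 29 ∧
          c.toNat ≠ 30 ∧ c.toNat ≠ 133 ∧ c.toNat ≠ 8232 ∧ c.toNat ≠ 8233 := by omega
      simp [h10, h13, hn, hr, hrest.1, hrest.2.1, hrest.2.2.1, hrest.2.2.2.1,
        hrest.2.2.2.2.1, hrest.2.2.2.2.2.1, hrest.2.2.2.2.2.2.1, hrest.2.2.2.2.2.2.2]

-- splitlines.go computes pvWithCur on Dom strings
theorem pvGo_eq_withCur (isB : Char → Bool)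
    (hIsB : ∀ c, pvDomChar c = true → isB c = (decide (c = '\n') || decide (c = '\r'))) :
    ∀ (n : Nat) (s : List Char), s.length ≤ n → (∀ c ∈ s, pvDomChar c = true) →
      ∀ (cur : List Char) (acc : List (List Char)),
        PySem.Chars.splitlines.go isB s cur acc = acc.reverse ++ pvWithCur cur s := by
  intro n
  induction n with
  | zero =>
    intro s hs _ cur acc
    have : s = [] := List.eq_nil_of_length_eq_zero (by omega)
    subst this
    rw [PySem.Chars.splitlines.go.eq_def]
    by_cases h : cur.isEmpty <;> simp [pvWithCur, h]
  | succ n ih =>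
    intro s hs hdom cur acc
    cases s with
    | nil =>
      rw [PySem.Chars.splitlines.go.eq_def]
      by_cases h : cur.isEmpty <;> simp [pvWithCur, h]
    | cons c rest =>
      by_cases hrn : c = '\r' ∧ ∃ r', rest = '\n' :: r'
      · obtain ⟨rfl, r', rfl⟩ := hrn
        have hstep : PySem.Chars.splitlines.go isB ('\r' :: '\n' :: r') cur acc
            = PySem.Chars.splitlines.go isB r' [] (cur.reverse :: acc) := rfl
        rw [hstep, ih r' (by simp at hs ⊢; omega)
          (fun d hd => hdom d (by simp [hd])) [] (cur.reverse :: acc)]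
        rw [← pvLines_eq_withCur]
        have h2 : pvWithCur cur ('\r' :: '\n' :: r') = (cur.reverse ++ []) :: pvLines r' := rfl
        rw [h2]; simp
      · rw [pvGo_generic isB c rest cur acc hrn]
        have hc := hIsB c (hdom c (by simp))
        have hdrest : ∀ d ∈ rest, pvDomChar d = true := fun d hd => hdom d (by simp [hd])
        have hlen : rest.length ≤ n := by simp at hs; omega
        by_cases hn : c = '\n'
        · subst hn
          rw [if_pos (by simp [hc]), ih rest hlen hdrest [] (cur.reverse :: acc)]
          rw [← pvLines_eq_withCur]
          have h2 : pvWithCur cur ('\n' :: rest) = (cur.reverse ++ []) :: pvLines rest := rfl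
          rw [h2]; simp
        · by_cases hr : c = '\r'
          · subst hr
            rw [if_pos (by simp [hc]), ih rest hlen hdrest [] (cur.reverse :: acc)]
            have hnl : pvNextLine ('\r' :: rest) = ([], rest) :=
              pvNextLine_cr rest (fun r' hh => hrn ⟨rfl, r', hh⟩)
            rw [← pvLines_eq_withCur]
            have h2 : pvWithCur cur ('\r' :: rest)
                = (cur.reverse ++ (pvNextLine ('\r' :: rest)).1)
                  :: pvLines (pvNextLine ('\r' :: rest)).2 := rfl
            rw [h2, hnl]; simp
          · rw [if_neg (by simp [hc, hn, hr]), ih rest hlen hdrest (c :: cur) acc]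
            have hnl : pvNextLine (c :: rest)
                = (c :: (pvNextLine rest).1, (pvNextLine rest).2) := by
              simp [pvNextLine, hn, hr]
            have h2 : pvWithCur cur (c :: rest)
                = (cur.reverse ++ (pvNextLine (c :: rest)).1)
                  :: pvLines (pvNextLine (c :: rest)).2 := rfl
            rw [h2, hnl]
            cases rest with
            | nil =>
              have h3 : pvWithCur (c :: cur) [] = [(c :: cur).reverse] := rfl
              have h4 : pvNextLine [] = (([] : List Char), ([] : List Char)) := rfl
              rw [h3, h4]
              have h5 : pvLines [] = [] := by rw [pvLines]
              simp [h5]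
            | cons d r'' =>
              have h3 : pvWithCur (c :: cur) (d :: r'')
                  = ((c :: cur).reverse ++ (pvNextLine (d :: r'')).1)
                    :: pvLines (pvNextLine (d :: r'')).2 := rfl
              rw [h3]; simp

theorem pvSplitlines_eq (s : List Char) (hdom : ∀ c ∈ s, pvDomChar c = true) :
    PySem.Chars.splitlines s = pvLines s := by
  have h := pvGo_eq_withCur
    (fun c =>
      decide (c.toNat = 10) || decide (c.toNat = 13) || decide (c.toNat = 11) ||
      decide (c.toNat = 12) || decide (c.toNat = 28) || decide (c.toNat = 29) ||
      decide (c.toNat = 30) || decide (c.toNat = 133) || decide (c.toNat = 8232) ||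
      decide (c.toNat = 8233))
    (fun c hc => pvIsB_eq c hc) s.length s le_rfl hdom [] []
  unfold PySem.Chars.splitlines
  rw [pvLines_eq_withCur]
  simpa using h

-- B's scanner loop computes A's fold over the line list
theorem pvGoB_eq : ∀ (n : Nat) (s : List Char), s.length ≤ n →
    ∀ (header : Option (List String)) (rows : List (List (String × String))),
      pvGoB s header rows
        = (((pvLines s).map String.ofList).foldl pvStepA (rows, header)).1 := by
  intro n
  induction n with
  | zero =>
    intro s hs header rows
    have : s = [] := List.eq_nil_of_length_eq_zero (by omega)
    subst this
    simp [pvGoB, pvLines]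
  | succ n ih =>
    intro s hs header rows
    cases s with
    | nil => simp [pvGoB, pvLines]
    | cons c0 cs =>
      have hlen : (pvNextLine (c0 :: cs)).2.length ≤ n := by
        have h1 := pvNextLine_len_lt c0 cs
        have h2 : (c0 :: cs).length = cs.length + 1 := by simp
        simp only [List.length_cons] at hs
        omega
      rw [pvLines, List.map_cons, List.foldl_cons, pvGoB]
      cases hline : (pvNextLine (c0 :: cs)).1 with
      | nil =>
        have hstep : pvStepA (rows, header) (String.ofList []) = (rows, header) := by
          unfold pvStepA; rw [if_pos (by simp)]
        rw [hstep]
        exact ih _ hlen header rows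
      | cons c r =>
        dsimp only
        by_cases hc : c = '#'
        · subst hc
          have hstep : pvStepA (rows, header) (String.ofList ('#' :: r)) = (rows, header) := by
            unfold pvStepA
            rw [if_pos (by simp [PySem.Str.startswith, PySem.Chars.startswith, List.isPrefixOf])]
          rw [hstep]
          exact ih _ hlen header rows
        · have hstart : PySem.Chars.startswith (c :: r) ['#'] = false := by
            simp [PySem.Chars.startswith, List.isPrefixOf]
            exact fun h => hc h.symm
          rw [if_neg hc]
          have hparts := pvParts_eq (c :: r)
          cases header with
          | none =>
            dsimp only
            have hstep : pvStepA (rows, none) (String.ofList (c :: r))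
                = (rows, some (pvSplitTabGo (c :: r) [] [])) := by
              unfold pvStepA
              rw [if_neg (by simp [hstart, String.ext_iff])]
              simp [hparts]
            rw [hstep]
            exact ih _ hlen _ rows
          | some hd =>
            dsimp only
            by_cases hnum : pvNumeric (pvSplitTabGo (c :: r) [] [])
            · have hstep : pvStepA (rows, some hd) (String.ofList (c :: r))
                  = (rows, some hd) := by
                unfold pvStepA
                rw [if_neg (by simp [hstart, String.ext_iff])]
                simp [hparts, hnum]
              rw [hstep, if_pos hnum]
              exact ih _ hlen _ rows
            · have hstep : pvStepA (rows, some hd) (String.ofList (c :: r))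
                  = (rows ++ [pvRow hd (pvSplitTabGo (c :: r) [] [])], some hd) := by
                unfold pvStepA
                rw [if_neg (by simp [hstart, String.ext_iff])]
                simp [hparts, hnum]
              rw [hstep, if_neg hnum]
              exact ih _ hlen _ _

-- ===== VERDICT (by name: the statement is the Claim_ definition above) =====
theorem parse_rdb_py_spec : Claim_equal_parse_rdb_py := by
  intro text hdom
  unfold Spec_parse_rdb_py parse_rdb_py parse_rdb_py_alt
  have hs : ∀ c ∈ text.toList, pvDomChar c = true := by
    unfold Dom_parse_rdb_py pvDomStr at hdom
    simpa [List.all_eq_true] using hdom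
  have h1 : PySem.Str.splitlines text = (pvLines text.toList).map String.ofList := by
    unfold PySem.Str.splitlines
    rw [pvSplitlines_eq _ hs]
  rw [h1, pvGoB_eq text.toList.length text.toList le_rfl none []]
  rfl
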